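-- pv_equiv track=rewrite | github.com/yawei-lucky/uav_airsim_llm | src/vlnce_src/closeloop_util.py | target_distance_increasing_for_10frames
-- ===== SOURCE A (Python) =====
-- def target_distance_increasing_for_10frames(lst):
--     if len(lst) < 10:
--         return False
--     sublist = lst[-10:]
--     for i in range(1, len(sublist)):
--         if sublist[i] < sublist[i - 1]:
--             return False
--     return True
-- ===== SOURCE B (Python) =====
-- def target_distance_increasing_for_10frames(lst):
--     if len(lst) < 10:
--         return False
--     sub = lst[-10:]
--     return sub == sorted(sub)
-- ===== Notes on version B (the rewrite author's own statement) =====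
-- stated objective: simpler
-- what changed: B replaces the index-based adjacent-pair scan with a sort-then-compare: it sorts the last-10 window and checks equality with the original window.
import Mathlib
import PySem

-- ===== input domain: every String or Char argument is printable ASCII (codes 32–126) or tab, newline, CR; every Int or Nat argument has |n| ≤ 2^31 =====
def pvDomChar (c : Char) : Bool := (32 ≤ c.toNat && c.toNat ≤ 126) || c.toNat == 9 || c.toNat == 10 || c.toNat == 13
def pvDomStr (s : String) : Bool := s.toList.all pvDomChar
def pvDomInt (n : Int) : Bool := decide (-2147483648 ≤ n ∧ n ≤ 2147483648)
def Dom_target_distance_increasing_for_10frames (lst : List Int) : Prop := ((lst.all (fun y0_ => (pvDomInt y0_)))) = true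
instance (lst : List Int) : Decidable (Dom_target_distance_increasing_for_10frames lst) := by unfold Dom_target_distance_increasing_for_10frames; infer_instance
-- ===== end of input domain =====

-- B replaces the index-based adjacent-pair scan with sort-then-compare on the last-10 window (objective: simpler).

-- ===== PORT A =====
-- the 'for i in range(1, len(sublist))' loop with early 'return False';
-- indices drawn from the range are always in bounds, so pyGetD's default is never used
def pvALoop (sub : List Int) : List Int → Bool
  | [] => true
  | i :: rest =>
      if PySem.List.pyGetD sub i 0 < PySem.List.pyGetD sub (i - 1) 0 then false
      else pvALoop sub rest

def target_distance_increasing_for_10frames (lst : List Int) : Bool :=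
  if lst.length < 10 then false
  else
    let sublist := PySem.List.slice lst (some (-10)) none
    pvALoop sublist (PySem.List.pyRange 1 (sublist.length : Int))

-- ===== PORT B =====
def target_distance_increasing_for_10frames_alt (lst : List Int) : Bool :=
  if lst.length < 10 then false
  else
    let sub := PySem.List.slice lst (some (-10)) none
    decide (sub = PySem.List.sorted sub (fun x => x))

-- ===== PRECONDITION & SPEC =====
def Spec_target_distance_increasing_for_10frames (lst : List Int) (out : Bool) : Prop := out = target_distance_increasing_for_10frames_alt lst
instance (lst : List Int) (out : Bool) : Decidable (Spec_target_distance_increasing_for_10frames lst out) := by unfold Spec_target_distance_increasing_for_10frames; infer_instance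

-- ===== CLAIM (what is proved, stated in full; the proofs are below) =====
def Claim_equal_target_distance_increasing_for_10frames : Prop := ∀ (lst : List Int), Dom_target_distance_increasing_for_10frames lst → Spec_target_distance_increasing_for_10frames lst (target_distance_increasing_for_10frames lst)

-- ===== LEMMAS AND PROOFS =====

-- the loop returns true iff no listed index witnesses a descent
theorem pvALoop_eq_true_iff (sub : List Int) (idxs : List Int) :
    pvALoop sub idxs = true ↔
      ∀ i ∈ idxs, ¬ (PySem.List.pyGetD sub i 0 < PySem.List.pyGetD sub (i - 1) 0) := by
  induction idxs with
  | nil => simp [pvALoop]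
  | cons i rest ih =>
      simp only [pvALoop, List.mem_cons]
      split_ifs with h
      · simp only [false_iff]
        intro hall
        exact hall i (Or.inl rfl) h
      · simp [ih]
        intro _
        omega

-- the scan over range(1, len(sub)) decides exactly Pairwise (· ≤ ·)
theorem pvALoop_range_iff_pairwise (sub : List Int) :
    pvALoop sub (PySem.List.pyRange 1 (sub.length : Int)) = true ↔
      List.Pairwise (· ≤ ·) sub := by
  rw [pvALoop_eq_true_iff, ← List.isChain_iff_pairwise, List.isChain_iff_getElem]
  constructor
  · intro h k hk
    have hmem : ((k : Int) + 1) ∈ PySem.List.pyRange 1 (sub.length : Int) := by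
      rw [PySem.List.mem_pyRange_one]; omega
    have := h ((k : Int) + 1) hmem
    rw [PySem.List.pyGetD_eq_getElem sub 0 (by omega) (by exact_mod_cast (by omega : (k:Int) + 1 < (sub.length : Int)))] at this
    rw [PySem.List.pyGetD_eq_getElem sub 0 (by omega) (by exact_mod_cast (by omega : (k:Int) + 1 - 1 < (sub.length : Int)))] at this
    have h1 : ((k : Int) + 1).toNat = k + 1 := by omega
    have h2 : ((k : Int) + 1 - 1).toNat = k := by omega
    simp only [h1, h2] at this
    omega
  · intro h i hi
    rw [PySem.List.mem_pyRange_one] at hi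
    rw [PySem.List.pyGetD_eq_getElem sub 0 (by omega) (by omega)]
    rw [PySem.List.pyGetD_eq_getElem sub 0 (by omega) (by omega)]
    have hk : ∃ k : Nat, (i : Int) = (k : Int) + 1 ∧ k + 1 < sub.length := by
      refine ⟨(i - 1).toNat, by omega, by omega⟩
    obtain ⟨k, hki, hkl⟩ := hk
    have h1 : i.toNat = k + 1 := by omega
    have h2 : (i - 1).toNat = k := by omega
    simp only [h1, h2]
    have := h k hkl
    omega

-- sub equals its sort iff sub is pairwise non-decreasing
theorem eq_sorted_iff_pairwise (sub : List Int) :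
    sub = PySem.List.sorted sub (fun x => x) ↔ List.Pairwise (· ≤ ·) sub := by
  constructor
  · intro h
    have := PySem.List.sorted_pairwise sub (fun x => x)
    rw [← h] at this
    exact this
  · intro h
    exact (PySem.List.sorted_eq_self_of_pairwise sub (fun x => x) h).symm

-- ===== VERDICT (by name: the statement is the Claim_ definition above) =====
theorem target_distance_increasing_for_10frames_spec : Claim_equal_target_distance_increasing_for_10frames := by
  intro lst _
  unfold Spec_target_distance_increasing_for_10frames
  unfold target_distance_increasing_for_10frames target_distance_increasing_for_10frames_alt
  split_ifs with h
  · rfl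
  · simp only []
    rw [Bool.eq_iff_iff, pvALoop_range_iff_pairwise, decide_eq_true_iff,
        eq_sorted_iff_pairwise]
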